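-- pv_equiv track=rewrite | github.com/ishaan04104/Deep-Learning-Framework-for-Fault-Detection-and-Diagnosis-in-Grid-Connected-PV-Systems-Using-GAN | Codes/Top10FS_BalancedGan_CarbonEfficient.py | _select_features_from_sets
-- ===== SOURCE A (Python) =====
-- def _select_features_from_sets(feature_sets: dict,
--                                mode: str = "majority",
--                                vote_threshold: int = 3,
--                                topk_each: int = 6):
--     """
--     Returns: (selected_features: List[str], tag: str)
--     'tag' is appended to all filenames (scaler, models, plots, results).
--     """
--     sets = {k: list(v) for k, v in feature_sets.items()}
--     all_feats = sorted({f for v in sets.values() for f in v})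
--
--     if mode == "all":
--         return all_feats, "fs-all"
--
--     if mode == "union":
--         return all_feats, "fs-union"
--
--     if mode == "intersection":
--         inter = set(all_feats)
--         for lst in sets.values():
--             inter &= set(lst)
--         return sorted(inter), "fs-intersection"
--
--     if mode == "topk_each":
--         chosen = []
--         for _, lst in sets.items():
--             chosen.extend(lst[:min(topk_each, len(lst))])
--         # unique while preserving insertion order
--         chosen = list(dict.fromkeys(chosen))
--         return sorted(chosen), f"fs-topk{topk_each}"
--
--     if mode == "majority":
--         from collections import Counter
--         c = Counter()
--         for lst in sets.values():
--             c.update(lst)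
--         maj = sorted([f for f, cnt in c.items() if cnt >= vote_threshold])
--         return maj, f"fs-majority{vote_threshold}"
--
--     return all_feats, "fs-union"
-- ===== SOURCE B (Python) =====
-- def _select_features_from_sets(feature_sets: dict,
--                                mode: str = "majority",
--                                vote_threshold: int = 3,
--                                topk_each: int = 6):
--     """
--     Returns: (selected_features: List[str], tag: str)
--
--     One pass over the lists builds two tables up front: 'occ' counts every
--     occurrence of a feature (duplicates inside a set count), 'present' counts
--     how many sets contain the feature.  Every counting mode is then a filter
--     over the table keys; only 'topk_each' needs the original list prefixes.
--     """
--     lists = list(feature_sets.values())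
--     occ = {}
--     present = {}
--     for lst in lists:
--         for f in lst:
--             occ[f] = occ.get(f, 0) + 1
--         for f in set(lst):
--             present[f] = present.get(f, 0) + 1
--
--     if mode == "intersection":
--         n = len(lists)
--         return sorted(f for f in occ if present[f] == n), "fs-intersection"
--
--     if mode == "topk_each":
--         chosen = dict.fromkeys(f for lst in lists for f in lst[:topk_each])
--         return sorted(chosen), f"fs-topk{topk_each}"
--
--     if mode == "majority":
--         return sorted(f for f in occ if occ[f] >= vote_threshold), f"fs-majority{vote_threshold}"
--
--     return sorted(occ), ("fs-all" if mode == "all" else "fs-union")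
-- ===== Notes on version B (the rewrite author's own statement) =====
-- stated objective: alternative
-- what changed: B makes one pass over the feature lists building two tables (total occurrence counts and per-feature set-membership counts) and derives intersection/majority/union/all as filters over the table keys, replacing A's per-mode machinery (iterated set intersection, a Counter built only inside the majority branch); only topk_each keeps its own prefix-slice pass.
import Mathlib
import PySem

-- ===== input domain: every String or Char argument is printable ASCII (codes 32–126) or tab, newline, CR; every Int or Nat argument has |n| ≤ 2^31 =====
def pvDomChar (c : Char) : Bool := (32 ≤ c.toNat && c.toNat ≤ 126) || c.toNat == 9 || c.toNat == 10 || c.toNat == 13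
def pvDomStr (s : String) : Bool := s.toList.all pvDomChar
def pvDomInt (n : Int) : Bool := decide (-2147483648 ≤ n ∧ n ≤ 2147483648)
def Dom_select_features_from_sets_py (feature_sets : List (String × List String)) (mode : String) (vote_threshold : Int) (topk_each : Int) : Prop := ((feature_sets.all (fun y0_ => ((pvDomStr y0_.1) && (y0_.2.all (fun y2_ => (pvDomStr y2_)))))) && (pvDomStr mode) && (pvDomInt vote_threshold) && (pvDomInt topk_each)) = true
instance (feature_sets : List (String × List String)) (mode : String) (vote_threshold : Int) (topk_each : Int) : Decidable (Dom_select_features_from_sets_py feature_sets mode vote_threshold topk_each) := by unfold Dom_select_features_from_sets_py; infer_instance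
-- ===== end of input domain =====

-- B replaces A's per-mode scans (iterated set intersection, a Counter built only for
-- 'majority') by one pass that builds an occurrence table and a set-membership table,
-- from which every counting mode is a filter over the table keys (objective: alternative).

-- ===== PORT A =====
def select_features_from_sets_py (feature_sets : List (String × List String)) (mode : String) (vote_threshold : Int) (topk_each : Int) : List String × String :=
  -- sets = {k: list(v) for k, v in feature_sets.items()}
  let sets := PySem.Dict.ofList feature_sets
  -- all_feats = sorted({f for v in sets.values() for f in v})
  let all_feats := PySem.List.sorted (PySem.Set.ofList sets.values.flatten) (fun x => x) false
  if mode == "all" then (all_feats, "fs-all")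
  else if mode == "union" then (all_feats, "fs-union")
  else if mode == "intersection" then
    -- inter = set(all_feats); for lst in sets.values(): inter &= set(lst)
    let inter := sets.values.foldl (fun s lst => PySem.Set.inter s lst) (PySem.Set.ofList all_feats)
    (PySem.List.sorted inter (fun x => x) false, "fs-intersection")
  else if mode == "topk_each" then
    -- chosen.extend(lst[:min(topk_each, len(lst))]); chosen = list(dict.fromkeys(chosen))
    let chosen := sets.values.foldl (fun acc lst => acc ++ PySem.List.slice lst none (some (min topk_each (lst.length : Int)))) []
    (PySem.List.sorted (PySem.List.dedup chosen) (fun x => x) false, "fs-topk" ++ PySem.Int.toStr topk_each)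
  else if mode == "majority" then
    -- c = Counter(); for lst in sets.values(): c.update(lst)
    let c := sets.values.foldl (fun d lst => lst.foldl (fun d f => d.modify f 0 (· + 1)) d) (PySem.Dict.empty : PySem.Dict String Int)
    (PySem.List.sorted ((c.items.filter (fun p => vote_threshold ≤ p.2)).map (·.1)) (fun x => x) false, "fs-majority" ++ PySem.Int.toStr vote_threshold)
  else (all_feats, "fs-union")

-- ===== PORT B =====
def select_features_from_sets_py_alt (feature_sets : List (String × List String)) (mode : String) (vote_threshold : Int) (topk_each : Int) : List String × String :=
  let lists := (PySem.Dict.ofList feature_sets).values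
  -- one pass: occ[f] += 1 for every occurrence, present[f] += 1 once per containing set
  let tables := lists.foldl
    (fun (st : PySem.Dict String Int × PySem.Dict String Int) lst =>
      (lst.foldl (fun d f => d.modify f 0 (· + 1)) st.1,
       (PySem.Set.ofList lst).foldl (fun d f => d.modify f 0 (· + 1)) st.2))
    (PySem.Dict.empty, PySem.Dict.empty)
  let occ := tables.1
  let present := tables.2
  if mode == "intersection" then
    (PySem.List.sorted (occ.keys.filter (fun f => present.getD f 0 == (lists.length : Int))) (fun x => x) false, "fs-intersection")
  else if mode == "topk_each" then
    (PySem.List.sorted (PySem.List.dedup (lists.flatMap (fun lst => PySem.List.slice lst none (some topk_each)))) (fun x => x) false,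
     "fs-topk" ++ PySem.Int.toStr topk_each)
  else if mode == "majority" then
    (PySem.List.sorted (occ.keys.filter (fun f => vote_threshold ≤ occ.getD f 0)) (fun x => x) false,
     "fs-majority" ++ PySem.Int.toStr vote_threshold)
  else (PySem.List.sorted occ.keys (fun x => x) false, if mode == "all" then "fs-all" else "fs-union")

-- ===== PRECONDITION & SPEC =====
def Spec_select_features_from_sets_py (feature_sets : List (String × List String)) (mode : String) (vote_threshold : Int) (topk_each : Int) (out : List String × String) : Prop := out = select_features_from_sets_py_alt feature_sets mode vote_threshold topk_each
instance (feature_sets : List (String × List String)) (mode : String) (vote_threshold : Int) (topk_each : Int) (out : List String × String) : Decidable (Spec_select_features_from_sets_py feature_sets mode vote_threshold topk_each out) := by unfold Spec_select_features_from_sets_py; infer_instance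

-- ===== CLAIM (what is proved, stated in full; the proofs are below) =====
def Claim_equal_select_features_from_sets_py : Prop := ∀ (feature_sets : List (String × List String)) (mode : String) (vote_threshold : Int) (topk_each : Int), Dom_select_features_from_sets_py feature_sets mode vote_threshold topk_each → Spec_select_features_from_sets_py feature_sets mode vote_threshold topk_each (select_features_from_sets_py feature_sets mode vote_threshold topk_each)

-- ===== LEMMAS AND PROOFS =====

-- A's per-set Counter.update loop is the Counter of the flattened lists.
theorem foldl_nested_counter (vals : List (List String)) (d : PySem.Dict String Int) :
    vals.foldl (fun d lst => lst.foldl (fun d f => d.modify f 0 (· + 1)) d) d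
      = vals.flatten.foldl (fun d f => d.modify f 0 (· + 1)) d := by
  induction vals generalizing d with
  | nil => rfl
  | cons h t ih => simp [List.foldl_append, ih]

-- B's set-membership loop is the Counter of the flattened per-set dedups.
theorem present_nested_counter (vals : List (List String)) (d : PySem.Dict String Int) :
    vals.foldl (fun d lst => (PySem.Set.ofList lst).foldl (fun d f => d.modify f 0 (· + 1)) d) d
      = (vals.map PySem.Set.ofList).flatten.foldl (fun d f => d.modify f 0 (· + 1)) d := by
  induction vals generalizing d with
  | nil => rfl
  | cons h t ih => simp [List.foldl_append, ih]

-- A's iterated '&=' keeps exactly the elements of the start set that lie in every list.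
theorem mem_foldl_inter (vals : List (List String)) (s : List String) (x : String) :
    x ∈ vals.foldl (fun s lst => PySem.Set.inter s lst) s ↔ x ∈ s ∧ ∀ lst ∈ vals, x ∈ lst := by
  induction vals generalizing s with
  | nil => simp
  | cons h t ih =>
    simp only [List.foldl_cons, ih, PySem.Set.mem_inter, List.mem_cons]
    constructor
    · rintro ⟨⟨hs, hh⟩, hall⟩
      exact ⟨hs, fun lst hl => hl.elim (fun e => e ▸ hh) (hall lst)⟩
    · rintro ⟨hs, hall⟩
      exact ⟨⟨hs, hall h (Or.inl rfl)⟩, fun lst hl => hall lst (Or.inr hl)⟩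

theorem nodup_foldl_inter (vals : List (List String)) (s : List String) (hs : s.Nodup) :
    (vals.foldl (fun s lst => PySem.Set.inter s lst) s).Nodup := by
  induction vals generalizing s with
  | nil => exact hs
  | cons h t ih => exact ih _ (PySem.Set.nodup_inter s h hs)

-- occurrences in the flattened dedups = number of lists containing x
theorem count_flatten_sets (vals : List (List String)) (x : String) :
    ((vals.map PySem.Set.ofList).flatten.count x) = vals.countP (fun lst => decide (x ∈ lst)) := by
  induction vals with
  | nil => rfl
  | cons h t ih =>
    simp only [List.map_cons, List.flatten_cons, List.count_append, List.countP_cons, ih]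
    by_cases hx : x ∈ h
    · rw [List.count_eq_one_of_mem (PySem.Set.nodup_ofList h) ((PySem.Set.mem_ofList h x).2 hx)]
      simp [hx, Nat.add_comm]
    · rw [List.count_eq_zero.2 (fun hc => hx ((PySem.Set.mem_ofList h x).1 hc))]
      simp [hx]

-- A's lst[:min(topk, len(lst))] is B's lst[:topk]
theorem slice_min_len (xs : List String) (b : Int) :
    PySem.List.slice xs none (some (min b (xs.length : Int))) = PySem.List.slice xs none (some b) := by
  by_cases hb : 0 ≤ b
  · rw [PySem.List.slice_to xs (le_min hb (Int.natCast_nonneg _)), PySem.List.slice_to xs hb]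
    by_cases h2 : b ≤ (xs.length : Int)
    · rw [min_eq_left h2]
    · rw [min_eq_right (not_le.1 h2).le]
      rw [List.take_of_length_le (by omega), List.take_of_length_le (by omega)]
  · rw [min_eq_left (le_trans (not_le.1 hb).le (Int.natCast_nonneg _))]

theorem branch_majority (flat : List String) (t : Int) :
    PySem.List.sorted (((PySem.Dict.counter flat).items.filter (fun p => t ≤ p.2)).map (·.1)) (fun x => x) false
      = PySem.List.sorted ((PySem.Dict.counter flat).keys.filter (fun f => t ≤ (PySem.Dict.counter flat).getD f 0)) (fun x => x) false := by
  simp [PySem.Dict.items_counter, PySem.Dict.keys_counter, PySem.Dict.getD_counter,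
        List.filter_map, Function.comp_def]

theorem branch_intersection (vals : List (List String)) :
    PySem.List.sorted
        (vals.foldl (fun s lst => PySem.Set.inter s lst)
          (PySem.Set.ofList (PySem.List.sorted (PySem.Set.ofList vals.flatten) (fun x => x) false)))
        (fun x => x) false
      = PySem.List.sorted
        ((PySem.Dict.counter vals.flatten).keys.filter
          (fun f => (PySem.Dict.counter ((vals.map PySem.Set.ofList).flatten)).getD f 0 == (vals.length : Int)))
        (fun x => x) false := by
  have hnd : (PySem.List.sorted (PySem.Set.ofList vals.flatten) (fun x => x) false).Nodup :=
    (PySem.List.sorted_perm _ _ _).nodup_iff.2 (PySem.Set.nodup_ofList _)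
  rw [PySem.Set.ofList_eq_self_of_nodup _ hnd, PySem.Dict.keys_counter]
  apply PySem.List.sorted_eq_sorted_of_perm _ _ _ (fun a b h => h)
  rw [List.perm_ext_iff_of_nodup (nodup_foldl_inter _ _ hnd) ((PySem.Set.nodup_ofList _).filter _)]
  intro x
  rw [mem_foldl_inter, List.mem_filter]
  simp only [PySem.List.mem_sorted, PySem.Set.mem_ofList, PySem.Dict.getD_counter,
    count_flatten_sets, beq_iff_eq, Nat.cast_inj]
  rw [List.countP_eq_length]
  simp

-- ===== VERDICT (by name: the statement is the Claim_ definition above) =====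
theorem select_features_from_sets_py_spec : Claim_equal_select_features_from_sets_py := by
  intro fs mode vt tk _
  unfold Spec_select_features_from_sets_py
  show select_features_from_sets_py fs mode vt tk = select_features_from_sets_py_alt fs mode vt tk
  simp only [select_features_from_sets_py, select_features_from_sets_py_alt,
    PySem.List.foldl_prod_mk
      (f := fun (d : PySem.Dict String Int) (lst : List String) => lst.foldl (fun d f => d.modify f 0 (· + 1)) d)
      (g := fun (d : PySem.Dict String Int) (lst : List String) => (PySem.Set.ofList lst).foldl (fun d f => d.modify f 0 (· + 1)) d)]
  rw [foldl_nested_counter, present_nested_counter, ← PySem.Dict.counter_eq_foldl, ← PySem.Dict.counter_eq_foldl]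
  by_cases h1 : mode = "all"
  · subst h1; simp [PySem.Dict.keys_counter]
  · by_cases h2 : mode = "union"
    · subst h2; simp [PySem.Dict.keys_counter]
    · by_cases h3 : mode = "intersection"
      · subst h3; simp [branch_intersection]
      · by_cases h4 : mode = "topk_each"
        · subst h4
          rw [PySem.List.foldl_append_eq_flatMap]
          simp [slice_min_len]
        · by_cases h5 : mode = "majority"
          · subst h5; simp [branch_majority]
          · simp [h1, h2, h3, h4, h5, PySem.Dict.keys_counter]
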